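-- pv_equiv track=rewrite | github.com/Raihancuny/python | microstate_analysis_code/cms_analysis_wc.py | sort_resoi_list
-- ===== SOURCE A (Python) =====
-- from copy import deepcopy
--
-- IONIZABLES = ["ASP", "GLU", "ARG", "HIS", "LYS", "CYS", "TYR", "NTR", "CTR"]
--
-- def sort_resoi_list(resoi_list: list) -> list:
--     """Return the input 'res of interest' list with ionizable residues in
--     the same order as msa.IONIZABLES, i.e.:
--     acid, base, polar, N term, C term, followed by user provided res, sorted.
--     """
--     if not resoi_list:
--         return []
--
--     userlst = [res.upper() for res in resoi_list]
--     ioniz = deepcopy(IONIZABLES)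
--
--     ioniz_set = set(ioniz)
--     sym_diff = ioniz_set.symmetric_difference(userlst)
--     new_res = sym_diff.difference(ioniz_set)
--     removal = sym_diff.difference(new_res)
--     if removal:
--         for res in removal:
--             ioniz.pop(ioniz.index(res))
--
--     return ioniz + sorted(new_res)
-- ===== SOURCE B (Python) =====
-- IONIZABLES = ["ASP", "GLU", "ARG", "HIS", "LYS", "CYS", "TYR", "NTR", "CTR"]
--
-- def sort_resoi_list(resoi_list: list) -> list:
--     userset = {res.upper() for res in resoi_list}
--     kept = [r for r in IONIZABLES if r in userset]
--     extras = sorted(userset.difference(IONIZABLES))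
--     return kept + extras
-- ===== Notes on version B (the rewrite author's own statement) =====
-- stated objective: simpler
-- what changed: B filters the constant IONIZABLES list by membership in a set of the uppercased inputs and appends sorted set-difference extras, replacing A's deepcopy + symmetric_difference + index/pop removal loop and its empty-list guard.
import Mathlib
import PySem

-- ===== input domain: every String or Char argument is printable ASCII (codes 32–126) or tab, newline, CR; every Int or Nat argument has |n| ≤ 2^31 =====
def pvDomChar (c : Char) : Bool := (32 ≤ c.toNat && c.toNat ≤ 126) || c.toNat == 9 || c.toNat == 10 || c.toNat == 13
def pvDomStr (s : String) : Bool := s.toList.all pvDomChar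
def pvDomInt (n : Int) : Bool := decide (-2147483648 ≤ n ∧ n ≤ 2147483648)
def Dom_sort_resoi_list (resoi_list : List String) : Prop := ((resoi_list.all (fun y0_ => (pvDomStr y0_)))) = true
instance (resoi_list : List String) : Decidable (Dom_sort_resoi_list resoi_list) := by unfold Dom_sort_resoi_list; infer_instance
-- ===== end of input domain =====

-- B filters the constant ionizable list against a set of the uppercased inputs instead of
-- deep-copying it and popping absent entries; objective: simpler.

-- ===== PORT A =====
def IONIZABLES : List String := ["ASP", "GLU", "ARG", "HIS", "LYS", "CYS", "TYR", "NTR", "CTR"]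

def sort_resoi_list (resoi_list : List String) : List String :=
  if resoi_list = [] then []
  else
    let userlst := resoi_list.map PySem.Str.upper
    let ioniz := IONIZABLES          -- deepcopy of the constant list
    let ioniz_set : PySem.Set String := PySem.Set.ofList ioniz
    let sym_diff : PySem.Set String := PySem.Set.symmDiff ioniz_set (PySem.Set.ofList userlst)
    let new_res : PySem.Set String := PySem.Set.diff sym_diff ioniz_set
    let removal : PySem.Set String := PySem.Set.diff sym_diff new_res
    let ioniz2 :=
      if removal ≠ [] then
        removal.foldl (fun l res =>
          match PySem.List.index? l res with
          | some i =>
            match PySem.List.pop? l (i : Int) with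
            | some r => r.2
            | none => l            -- unreachable: index? guarantees a valid position
          | none => l              -- unreachable: removal ⊆ ioniz (Python would raise ValueError)
          ) ioniz
      else ioniz
    ioniz2 ++ PySem.List.sorted new_res (fun x => x) false

-- ===== PORT B =====
def sort_resoi_list_alt (resoi_list : List String) : List String :=
  let userset : PySem.Set String := PySem.Set.ofList (resoi_list.map PySem.Str.upper)
  let kept := IONIZABLES.filter (fun r => PySem.Set.contains userset r)
  let extras := PySem.List.sorted (PySem.Set.diff userset IONIZABLES) (fun x => x) false
  kept ++ extras

-- ===== PRECONDITION & SPEC =====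
def Spec_sort_resoi_list (resoi_list : List String) (out : List String) : Prop := out = sort_resoi_list_alt resoi_list
instance (resoi_list : List String) (out : List String) : Decidable (Spec_sort_resoi_list resoi_list out) := by unfold Spec_sort_resoi_list; infer_instance

-- ===== CLAIM (what is proved, stated in full; the proofs are below) =====
def Claim_equal_sort_resoi_list : Prop := ∀ (resoi_list : List String), Dom_sort_resoi_list resoi_list → Spec_sort_resoi_list resoi_list (sort_resoi_list resoi_list)

-- ===== LEMMAS AND PROOFS =====

-- one pop-step of A's removal loop is List.erase
theorem pop_step_eq_erase (l : List String) (res : String) :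
    (match PySem.List.index? l res with
     | some i =>
       match PySem.List.pop? l (i : Int) with
       | some r => r.2
       | none => l
     | none => l) = l.erase res := by
  by_cases h : res ∈ l
  · have hk : PySem.List.index? l res = some (l.idxOf res) := by
      rw [PySem.List.index?_eq_idxOf?]
      have := PySem.List.index?_isSome_iff (xs := l) (v := res) |>.mpr h
      rw [PySem.List.index?_eq_idxOf?] at this
      rcases Option.isSome_iff_exists.mp this with ⟨k, hk⟩
      rw [hk, List.idxOf_eq_getD_idxOf?, hk]; simp
    rw [hk]
    show (match PySem.List.pop? l ((l.idxOf res : Nat) : Int) with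
      | some r => r.2
      | none => l) = l.erase res
    rw [PySem.List.pop?_natCast l (l.idxOf res) (List.idxOf_lt_length_of_mem h)]
    exact List.eraseIdx_idxOf_eq_erase res l
  · rw [(PySem.List.index?_eq_none_iff l res).mpr h, List.erase_of_not_mem h]

-- folding erase over rs on a nodup list is filtering out rs
theorem foldl_erase_eq_filter (rs : List String) : ∀ (l : List String), l.Nodup →
    rs.foldl (fun l res => l.erase res) l = l.filter (fun x => decide (x ∉ rs)) := by
  induction rs with
  | nil => intro l _; simp
  | cons r rs ih =>
    intro l hl
    simp only [List.foldl_cons]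
    rw [ih (l.erase r) (hl.erase r), List.Nodup.erase_eq_filter hl, List.filter_filter]
    apply List.filter_congr
    intro x _
    by_cases hx : x = r <;> by_cases hy : x ∈ rs <;> simp [hx, hy]

-- ===== VERDICT (by name: the statement is the Claim_ definition above) =====
theorem sort_resoi_list_spec : Claim_equal_sort_resoi_list := by
  intro resoi_list _
  unfold Spec_sort_resoi_list
  by_cases hnil : resoi_list = []
  · subst hnil; decide
  · simp only [sort_resoi_list, sort_resoi_list_alt, if_neg hnil]
    set u := resoi_list.map PySem.Str.upper with hu
    set S : PySem.Set String := PySem.Set.ofList IONIZABLES with hS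
    set sym : PySem.Set String := PySem.Set.symmDiff S (PySem.Set.ofList u) with hsym
    set new_res : PySem.Set String := PySem.Set.diff sym S with hnew
    set removal : PySem.Set String := PySem.Set.diff sym new_res with hrem
    have hSnodup : List.Nodup S := PySem.Set.nodup_ofList _
    have hsymnodup : List.Nodup sym :=
      PySem.Set.nodup_symmDiff _ _ hSnodup (PySem.Set.nodup_ofList _)
    have hmemS : ∀ x : String, x ∈ S ↔ x ∈ IONIZABLES := fun x => PySem.Set.mem_ofList _ x
    have hmem_new : ∀ x : String, x ∈ new_res ↔ (x ∈ u ∧ x ∉ IONIZABLES) := by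
      intro x
      simp only [hnew, hsym, PySem.Set.mem_diff, PySem.Set.mem_symmDiff, PySem.Set.mem_ofList]
      tauto
    have hmem_rem : ∀ x : String, x ∈ removal ↔ (x ∈ IONIZABLES ∧ x ∉ u) := by
      intro x
      simp only [hrem, hnew, hsym, PySem.Set.mem_diff, PySem.Set.mem_symmDiff, PySem.Set.mem_ofList]
      tauto
    have hkept :
        (if removal ≠ [] then
          removal.foldl (fun l res =>
            match PySem.List.index? l res with
            | some i =>
              match PySem.List.pop? l (i : Int) with
              | some r => r.2
              | none => l
            | none => l) IONIZABLES
        else IONIZABLES)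
          = IONIZABLES.filter (fun r => PySem.Set.contains (PySem.Set.ofList u) r) := by
      have hfilter :
          IONIZABLES.filter (fun x => decide (x ∉ removal))
            = IONIZABLES.filter (fun r => PySem.Set.contains (PySem.Set.ofList u) r) := by
        apply List.filter_congr
        intro x hx
        rw [Bool.eq_iff_iff]
        simp only [decide_eq_true_eq, PySem.Set.contains_eq_listContains, List.contains_iff_mem,
          PySem.Set.mem_ofList, hmem_rem x]
        tauto
      by_cases hre : removal = []
      · rw [if_neg (by simp [hre]), ← hfilter, hre]
        simp
      · rw [if_pos hre, ← hfilter]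
        have hstep : (fun (l : List String) res =>
            match PySem.List.index? l res with
            | some i =>
              match PySem.List.pop? l (i : Int) with
              | some r => r.2
              | none => l
            | none => l) = fun (l : List String) res => l.erase res := by
          funext l res; exact pop_step_eq_erase l res
        rw [hstep]
        exact foldl_erase_eq_filter removal IONIZABLES (by decide)
    have hsorted :
        PySem.List.sorted new_res (fun x => x) false
          = PySem.List.sorted (PySem.Set.diff (PySem.Set.ofList u) IONIZABLES) (fun x => x) false := by
      apply PySem.List.sorted_eq_sorted_of_perm
      · exact fun a b h => h
      · rw [List.perm_ext_iff_of_nodup (PySem.Set.nodup_diff _ _ hsymnodup)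
          (PySem.Set.nodup_diff _ _ (PySem.Set.nodup_ofList _))]
        intro x
        rw [hmem_new x, PySem.Set.mem_diff, PySem.Set.mem_ofList]
    rw [hkept, hsorted]
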